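-- pv_equiv track=rewrite | github.com/lijiasheng11/JPEG-Compression-and-ARCNN | JPEG_python/utils.py | zigzag_points
-- ===== SOURCE A (Python) =====
-- def zigzag_points(rows, cols):
--     # constants for directions
--     UP, DOWN, RIGHT, LEFT, UP_RIGHT, DOWN_LEFT = range(6)
--
--     # move the point in different directions
--     def move(direction, point):
--         return {
--             UP: lambda point: (point[0] - 1, point[1]),
--             DOWN: lambda point: (point[0] + 1, point[1]),
--             LEFT: lambda point: (point[0], point[1] - 1),
--             RIGHT: lambda point: (point[0], point[1] + 1),
--             UP_RIGHT: lambda point: move(UP, move(RIGHT, point)),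
--             DOWN_LEFT: lambda point: move(DOWN, move(LEFT, point))
--         }[direction](point)
--
--     # return true if point is inside the block bounds
--     def inbounds(point):
--         return 0 <= point[0] < rows and 0 <= point[1] < cols
--
--     # start in the top-left cell
--     point = (0, 0)
--
--     # True when moving up-right, False when moving down-left
--     move_up = True
--
--     for _ in range(rows * cols):
--         yield point
--         if move_up:
--             if inbounds(move(UP_RIGHT, point)):
--                 point = move(UP_RIGHT, point)
--             else:
--                 move_up = False
--                 if inbounds(move(RIGHT, point)):
--                     point = move(RIGHT, point)
--                 else:
--                     point = move(DOWN, point)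
--         else:
--             if inbounds(move(DOWN_LEFT, point)):
--                 point = move(DOWN_LEFT, point)
--             else:
--                 move_up = True
--                 if inbounds(move(DOWN, point)):
--                     point = move(DOWN, point)
--                 else:
--                     point = move(RIGHT, point)
-- ===== SOURCE B (Python) =====
-- def zigzag_points(rows, cols):
--     # an empty matrix has no cells
--     if rows <= 0 or cols <= 0:
--         return
--     # traverse anti-diagonals d = i+j; even d goes up-right (i descending), odd d down-left
--     for d in range(rows + cols - 1):
--         lo = max(0, d - cols + 1)
--         hi = min(d, rows - 1)
--         rng = range(hi, lo - 1, -1) if d % 2 == 0 else range(lo, hi + 1)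
--         for i in rng:
--             yield (i, d - i)
-- ===== Notes on version B (the rewrite author's own statement) =====
-- stated objective: faster
-- what changed: B enumerates the anti-diagonals d=i+j directly, computing each diagonal's row range in closed form and alternating direction by the parity of d (and returning at once for non-positive dimensions), instead of simulating per-cell moves through a direction dictionary of lambdas rebuilt on every move with a move_up flag.
-- intended difference: When rows < 0 and cols < 0 the product rows*cols is positive, so A emits rows*cols points that wander outside the (empty) matrix, e.g. A(-1,-1) yields [(0,0)] while B yields []; an empty traversal is the intended value for non-positive dimensions. — e.g. on zigzag_points(-1, -1): A returns [(0, 0)], B returns []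
import Mathlib
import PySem

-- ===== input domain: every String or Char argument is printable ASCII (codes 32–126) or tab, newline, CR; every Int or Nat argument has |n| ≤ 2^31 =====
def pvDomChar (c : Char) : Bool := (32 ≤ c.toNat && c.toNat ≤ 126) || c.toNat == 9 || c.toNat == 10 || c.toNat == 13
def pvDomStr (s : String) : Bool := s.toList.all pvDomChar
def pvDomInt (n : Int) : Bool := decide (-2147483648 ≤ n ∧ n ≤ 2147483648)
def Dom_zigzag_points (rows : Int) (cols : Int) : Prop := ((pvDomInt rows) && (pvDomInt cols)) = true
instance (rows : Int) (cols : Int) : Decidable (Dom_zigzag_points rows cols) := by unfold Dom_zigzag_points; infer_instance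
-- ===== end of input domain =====

-- B enumerates anti-diagonals in closed form instead of simulating per-cell moves (objective: faster, measured; B returns [] where A emits out-of-bounds points for two negative dimensions — see D_).

-- ===== PORT A =====
-- move(direction, point); UP=0, DOWN=1, RIGHT=2, LEFT=3, UP_RIGHT=4, DOWN_LEFT=5
def zzA_move (dir : Nat) (p : Int × Int) : Int × Int :=
  match dir with
  | 0 => (p.1 - 1, p.2)
  | 1 => (p.1 + 1, p.2)
  | 2 => (p.1, p.2 + 1)
  | 3 => (p.1, p.2 - 1)
  | 4 => zzA_move 0 (zzA_move 2 p)
  | _ + 5 => zzA_move 1 (zzA_move 3 p)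
termination_by dir
decreasing_by all_goals omega

-- inbounds(point)
def zzA_inb (rows cols : Int) (p : Int × Int) : Bool :=
  decide (0 ≤ p.1 ∧ p.1 < rows ∧ 0 ≤ p.2 ∧ p.2 < cols)

-- the 'for _ in range(rows*cols)' loop; fuel = remaining iterations
def zzA_loop (rows cols : Int) : Nat → (Int × Int) → Bool → List (Int × Int)
  | 0, _, _ => []
  | Nat.succ n, point, move_up =>
    point ::
    (if move_up then
       if zzA_inb rows cols (zzA_move 4 point) then
         zzA_loop rows cols n (zzA_move 4 point) true
       else
         if zzA_inb rows cols (zzA_move 2 point) then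
           zzA_loop rows cols n (zzA_move 2 point) false
         else
           zzA_loop rows cols n (zzA_move 1 point) false
     else
       if zzA_inb rows cols (zzA_move 5 point) then
         zzA_loop rows cols n (zzA_move 5 point) false
       else
         if zzA_inb rows cols (zzA_move 1 point) then
           zzA_loop rows cols n (zzA_move 1 point) true
         else
           zzA_loop rows cols n (zzA_move 2 point) true)

def zigzag_points (rows : Int) (cols : Int) : List (Int × Int) :=
  zzA_loop rows cols (rows * cols).toNat (0, 0) true

-- ===== PORT B =====
def zigzag_points_alt (rows : Int) (cols : Int) : List (Int × Int) :=
  if rows ≤ 0 || cols ≤ 0 then []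
  else (PySem.List.pyRange 0 (rows + cols - 1) 1).flatMap (fun d =>
    let lo := max 0 (d - cols + 1)
    let hi := min d (rows - 1)
    let rng := if PySem.Int.mod d 2 == 0 then PySem.List.pyRange hi (lo - 1) (-1)
               else PySem.List.pyRange lo (hi + 1) 1
    rng.map (fun i => (i, d - i)))

-- ===== PRECONDITION & SPEC =====
-- When rows < 0 and cols < 0 the product rows*cols is positive, so A emits rows*cols points that
-- wander outside the (empty) matrix (A(-1,-1) = [(0,0)]), while B yields []; an empty traversal is
-- the intended value for non-positive dimensions.
def D_zigzag_points (rows : Int) (cols : Int) : Prop := rows < 0 ∧ cols < 0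
instance (rows : Int) (cols : Int) : Decidable (D_zigzag_points rows cols) := by
  unfold D_zigzag_points; infer_instance

def Spec_zigzag_points (rows : Int) (cols : Int) (out : List (Int × Int)) : Prop :=
  ¬ D_zigzag_points rows cols → out = zigzag_points_alt rows cols
instance (rows : Int) (cols : Int) (out : List (Int × Int)) : Decidable (Spec_zigzag_points rows cols out) := by
  unfold Spec_zigzag_points; infer_instance

def pvDiffWitness_zigzag_points : Int × Int := (-1, -1)
def pvDiffWitnessOut_zigzag_points : (List (Int × Int)) × (List (Int × Int)) := ([(0, 0)], [])

-- ===== CLAIM (what is proved, stated in full; the proofs are below) =====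
def Claim_unchanged_zigzag_points : Prop := ∀ (rows : Int) (cols : Int), Dom_zigzag_points rows cols → Spec_zigzag_points rows cols (zigzag_points rows cols)
def Claim_changed_zigzag_points : Prop := Dom_zigzag_points (pvDiffWitness_zigzag_points.1) (pvDiffWitness_zigzag_points.2) ∧ D_zigzag_points (pvDiffWitness_zigzag_points.1) (pvDiffWitness_zigzag_points.2) ∧ zigzag_points (pvDiffWitness_zigzag_points.1) (pvDiffWitness_zigzag_points.2) = pvDiffWitnessOut_zigzag_points.1 ∧ zigzag_points_alt (pvDiffWitness_zigzag_points.1) (pvDiffWitness_zigzag_points.2) = pvDiffWitnessOut_zigzag_points.2 ∧ pvDiffWitnessOut_zigzag_points.1 ≠ pvDiffWitnessOut_zigzag_points.2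
def Claim_exact_zigzag_points : Prop := ∀ (rows : Int) (cols : Int), Dom_zigzag_points rows cols → D_zigzag_points rows cols → zigzag_points rows cols ≠ zigzag_points_alt rows cols


-- ===== LEMMAS AND PROOFS =====

-- abbreviations for the diagonal bounds (proof-side only)
def zzLo (C d : Int) : Int := max 0 (d - C + 1)
def zzHi (R d : Int) : Int := min d (R - 1)

-- B's per-diagonal list
def zzDiag (R C d : Int) : List (Int × Int) :=
  (if d % 2 = 0 then PySem.List.pyRange (zzHi R d) (zzLo C d - 1) (-1)
   else PySem.List.pyRange (zzLo C d) (zzHi R d + 1) 1).map (fun i => (i, d - i))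

lemma alt_eq (R C : Int) (hR : 1 ≤ R) (hC : 1 ≤ C) :
    zigzag_points_alt R C =
      (PySem.List.pyRange 0 (R + C - 1) 1).flatMap (fun d => zzDiag R C d) := by
  unfold zigzag_points_alt
  rw [if_neg (by simp; omega)]
  simp only [zzDiag, zzLo, zzHi,
    PySem.Int.mod_eq_emod_of_pos (by norm_num : (0:Int) < 2), beq_iff_eq]

lemma zzA_move4 (p : Int × Int) : zzA_move 4 p = (p.1 - 1, p.2 + 1) := by
  simp [zzA_move]

lemma zzA_move5 (p : Int × Int) : zzA_move 5 p = (p.1 + 1, p.2 - 1) := by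
  simp [zzA_move]

lemma zzA_inb_iff (R C : Int) (p : Int × Int) :
    zzA_inb R C p = true ↔ (0 ≤ p.1 ∧ p.1 < R ∧ 0 ≤ p.2 ∧ p.2 < C) := by
  simp [zzA_inb]

-- state after finishing an even (up-right) diagonal / an odd (down-left) diagonal
def zzNextE (C d : Int) : Int × Int :=
  if d - zzLo C d + 1 < C then (zzLo C d, d - zzLo C d + 1) else (zzLo C d + 1, d - zzLo C d)
def zzNextO (R d : Int) : Int × Int :=
  if zzHi R d + 1 < R then (zzHi R d + 1, d - zzHi R d) else (zzHi R d, d - zzHi R d + 1)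

lemma zz_even (R C d : Int) :
    ∀ (k m : Nat) (i : Int), i = zzLo C d + k → i ≤ zzHi R d →
      zzA_loop R C (k + m + 1) (i, d - i) true =
        (PySem.List.pyRange i (zzLo C d - 1) (-1)).map (fun t => (t, d - t)) ++
          zzA_loop R C m (zzNextE C d) false := by
  intro k
  induction k with
  | zero =>
    intro m i hi hih
    obtain rfl : i = zzLo C d := by omega
    have hub : ¬ (zzA_inb R C (zzA_move 4 (zzLo C d, d - zzLo C d)) = true) := by
      rw [zzA_move4, zzA_inb_iff]; dsimp only; unfold zzLo; omega
    rw [show (0 + m + 1 : Nat) = m + 1 by omega]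
    rw [zzA_loop, if_pos rfl, if_neg hub]
    simp only [zzA_move]
    rw [PySem.List.pyRange_neg_one_cons (by omega),
        PySem.List.pyRange_neg_one_eq_nil (by omega), List.map_cons, List.map_nil,
        List.cons_append, List.nil_append]
    unfold zzNextE
    by_cases hc : d - zzLo C d + 1 < C
    · rw [if_pos (by rw [zzA_inb_iff]; dsimp only; unfold zzLo zzHi at *; omega), if_pos hc]
    · rw [if_neg (by rw [zzA_inb_iff]; dsimp only; unfold zzLo zzHi at *; omega), if_neg hc]
  | succ k ih =>
    intro m i hi hih
    have hub : zzA_inb R C (zzA_move 4 (i, d - i)) = true := by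
      rw [zzA_move4, zzA_inb_iff]; dsimp only; unfold zzLo zzHi at *; omega
    rw [show (k + 1 + m + 1 : Nat) = (k + m + 1) + 1 by omega]
    rw [zzA_loop, if_pos rfl, if_pos hub, zzA_move4]
    rw [PySem.List.pyRange_neg_one_cons (by unfold zzLo at *; omega), List.map_cons,
        List.cons_append]
    dsimp only
    have hpt : ((i : Int) - 1, d - i + 1) = (i - 1, d - (i - 1)) := by
      have h2 : d - i + 1 = d - (i - 1) := by ring
      rw [h2]
    rw [hpt, ih m (i - 1) (by omega) (by omega)]

lemma zz_odd (R C d : Int) :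
    ∀ (k m : Nat) (i : Int), i = zzHi R d - k → zzLo C d ≤ i →
      zzA_loop R C (k + m + 1) (i, d - i) false =
        (PySem.List.pyRange i (zzHi R d + 1) 1).map (fun t => (t, d - t)) ++
          zzA_loop R C m (zzNextO R d) true := by
  intro k
  induction k with
  | zero =>
    intro m i hi hih
    obtain rfl : i = zzHi R d := by omega
    have hdl : ¬ (zzA_inb R C (zzA_move 5 (zzHi R d, d - zzHi R d)) = true) := by
      rw [zzA_move5, zzA_inb_iff]; dsimp only; unfold zzHi; omega
    rw [show (0 + m + 1 : Nat) = m + 1 by omega]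
    rw [zzA_loop, if_neg (by simp), if_neg hdl]
    simp only [zzA_move]
    rw [PySem.List.pyRange_one_cons (by omega),
        PySem.List.pyRange_one_eq_nil (by omega), List.map_cons, List.map_nil,
        List.cons_append, List.nil_append]
    unfold zzNextO
    by_cases hc : zzHi R d + 1 < R
    · rw [if_pos (by rw [zzA_inb_iff]; dsimp only; unfold zzLo zzHi at *; omega), if_pos hc]
    · rw [if_neg (by rw [zzA_inb_iff]; dsimp only; unfold zzLo zzHi at *; omega), if_neg hc]
  | succ k ih =>
    intro m i hi hih
    have hdl : zzA_inb R C (zzA_move 5 (i, d - i)) = true := by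
      rw [zzA_move5, zzA_inb_iff]; dsimp only; unfold zzLo zzHi at *; omega
    rw [show (k + 1 + m + 1 : Nat) = (k + m + 1) + 1 by omega]
    rw [zzA_loop, if_neg (by simp), if_pos hdl, zzA_move5]
    rw [PySem.List.pyRange_one_cons (by unfold zzHi at *; omega), List.map_cons,
        List.cons_append]
    dsimp only
    have hpt : ((i : Int) + 1, d - i - 1) = (i + 1, d - (i + 1)) := by
      have h2 : d - i - 1 = d - (i + 1) := by ring
      rw [h2]
    rw [hpt, ih m (i + 1) (by omega) (by omega)]

def zzStart (R C d : Int) : Int × Int :=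
  if d % 2 = 0 then (zzHi R d, d - zzHi R d) else (zzLo C d, d - zzLo C d)

def zzLen (R C d : Int) : Nat := (zzHi R d - zzLo C d + 1).toNat

-- one whole diagonal of the simulation
lemma zz_diag_step (R C d : Int) (hR : 1 ≤ R) (hC : 1 ≤ C) (hd0 : 0 ≤ d) (hd1 : d ≤ R + C - 2)
    (m : Nat) :
    zzA_loop R C (zzLen R C d + m) (zzStart R C d) (decide (d % 2 = 0)) =
      zzDiag R C d ++
        zzA_loop R C m (if d % 2 = 0 then zzNextE C d else zzNextO R d) (decide ((d + 1) % 2 = 0)) := by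
  have hlg : zzLo C d ≤ zzHi R d := by unfold zzLo zzHi; omega
  have hodd : decide ((d + 1) % 2 = 0) = !decide (d % 2 = 0) := by
    by_cases hp : d % 2 = 0 <;> simp [hp] <;> omega
  by_cases hp : d % 2 = 0
  · unfold zzStart zzDiag
    rw [if_pos hp, if_pos hp, if_pos hp, hodd]
    simp only [hp, decide_true, Bool.not_true]
    rw [show zzLen R C d + m = (zzHi R d - zzLo C d).toNat + m + 1 by unfold zzLen; omega]
    exact zz_even R C d _ m _ (by omega) (by omega)
  · unfold zzStart zzDiag
    rw [if_neg hp, if_neg hp, if_neg hp, hodd]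
    simp only [hp, decide_false, Bool.not_false]
    rw [show zzLen R C d + m = (zzHi R d - zzLo C d).toNat + m + 1 by unfold zzLen; omega]
    exact zz_odd R C d _ m _ (by omega) (by omega)

lemma zzNextE_eq (C d : Int) :
    zzNextE C d = (zzLo C (d + 1), d + 1 - zzLo C (d + 1)) := by
  unfold zzNextE zzLo
  split_ifs with h <;> simp only [Prod.mk.injEq] <;> constructor <;> omega

lemma zzNextO_eq (R d : Int) :
    zzNextO R d = (zzHi R (d + 1), d + 1 - zzHi R (d + 1)) := by
  unfold zzNextO zzHi
  split_ifs with h <;> simp only [Prod.mk.injEq] <;> constructor <;> omega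

-- cells in diagonals d .. R+C-2, with d = R+C-2-t
def zzFuel (R C : Int) : Nat → Nat
  | 0 => zzLen R C (R + C - 2)
  | (t + 1) => zzLen R C (R + C - 2 - ((t : Int) + 1)) + zzFuel R C t

lemma zz_outer (R C : Int) (hR : 1 ≤ R) (hC : 1 ≤ C) :
    ∀ (t : Nat) (d : Int), d = R + C - 2 - t → 0 ≤ d →
      zzA_loop R C (zzFuel R C t) (zzStart R C d) (decide (d % 2 = 0)) =
        (PySem.List.pyRange d (R + C - 1) 1).flatMap (fun e => zzDiag R C e) := by
  intro t
  induction t with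
  | zero =>
    intro d hd hd0
    obtain rfl : d = R + C - 2 := by omega
    rw [zzFuel, ← Nat.add_zero (zzLen R C (R + C - 2))]
    rw [zz_diag_step R C _ hR hC hd0 le_rfl 0]
    rw [show R + C - 1 = (R + C - 2) + 1 by ring, PySem.List.pyRange_one_singleton]
    simp [zzA_loop]
  | succ t ih =>
    intro d hd hd0
    rw [zzFuel, show R + C - 2 - ((t : Int) + 1) = d by push_cast at hd ⊢; omega]
    rw [zz_diag_step R C d hR hC hd0 (by omega) (zzFuel R C t)]
    have hnext : (if d % 2 = 0 then zzNextE C d else zzNextO R d) = zzStart R C (d + 1) := by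
      unfold zzStart
      by_cases hp : d % 2 = 0
      · rw [if_pos hp, zzNextE_eq, if_neg (by omega)]
      · rw [if_neg hp, zzNextO_eq, if_pos (by omega)]
    rw [hnext, ih (d + 1) (by push_cast at hd ⊢; omega) (by omega)]
    rw [PySem.List.pyRange_one_cons (show d < R + C - 1 by omega), List.flatMap_cons]

lemma diag_sum (r c : ℕ) (hr : 1 ≤ r) (hc : 1 ≤ c) :
    ∑ j ∈ Finset.range (r + c - 1), (min j (r - 1) + 1 - (j + 1 - c)) = r * c := by
  have h1 : ∀ j ∈ Finset.range (r + c - 1),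
      (min j (r - 1) + 1 - (j + 1 - c)) = (Finset.Icc (j + 1 - c) (min j (r - 1))).card := by
    intro j hj; rw [Nat.card_Icc]
  rw [Finset.sum_congr rfl h1, ← Finset.card_sigma]
  have hcard : ((Finset.range (r + c - 1)).sigma fun j => Finset.Icc (j + 1 - c) (min j (r - 1))).card
      = ((Finset.range r) ×ˢ (Finset.range c)).card := by
    apply Finset.card_nbij' (fun x => (x.2, x.1 - x.2)) (fun y => ⟨y.1 + y.2, y.1⟩)
    · intro x hx
      simp only [Finset.coe_sigma, Set.mem_sigma_iff, Finset.mem_coe, Finset.mem_range,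
        Finset.mem_Icc] at hx
      simp only [Finset.coe_product, Set.mem_prod, Finset.mem_coe, Finset.mem_range]
      omega
    · intro y hy
      simp only [Finset.coe_product, Set.mem_prod, Finset.mem_coe, Finset.mem_range] at hy
      simp only [Finset.coe_sigma, Set.mem_sigma_iff, Finset.mem_coe, Finset.mem_range,
        Finset.mem_Icc]
      omega
    · intro x hx
      simp only [Finset.coe_sigma, Set.mem_sigma_iff, Finset.mem_coe, Finset.mem_range,
        Finset.mem_Icc] at hx
      have hx2 : x.2 + (x.1 - x.2) = x.1 := by omega
      simp [hx2]
    · intro y hy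
      simp
  rw [hcard, Finset.card_product]
  simp [Finset.card_range]

lemma zzFuel_eq_sum (R C : Int) (t : Nat) :
    zzFuel R C t = ∑ s ∈ Finset.range (t + 1), zzLen R C (R + C - 2 - s) := by
  induction t with
  | zero => simp [zzFuel]
  | succ t ih =>
    rw [Finset.sum_range_succ, zzFuel, ih]
    push_cast
    ring

lemma zzFuel_total (R C : Int) (hR : 1 ≤ R) (hC : 1 ≤ C) :
    zzFuel R C ((R + C - 2).toNat) = (R * C).toNat := by
  set T := (R + C - 2).toNat with hT
  rw [zzFuel_eq_sum]
  have h1 : ∀ s ∈ Finset.range (T + 1),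
      zzLen R C (R + C - 2 - s) = (fun j : Nat => zzLen R C (j : Int)) (T + 1 - 1 - s) := by
    intro s hs
    simp only [Finset.mem_range] at hs
    congr 1
    omega
  rw [Finset.sum_congr rfl h1,
      Finset.sum_range_reflect (fun j : Nat => zzLen R C (j : Int)) (T + 1)]
  set r := R.toNat with hrdef
  set c := C.toNat with hcdef
  have hRr : R = (r : Int) := by omega
  have hCc : C = (c : Int) := by omega
  have hT1 : T + 1 = r + c - 1 := by omega
  have h2 : ∀ j ∈ Finset.range (r + c - 1),
      zzLen R C (j : Int) = (min j (r - 1) + 1 - (j + 1 - c)) := by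
    intro j hj
    unfold zzLen zzHi zzLo
    omega
  rw [hT1, Finset.sum_congr rfl h2, diag_sum r c (by omega) (by omega), hRr, hCc,
      ← Int.natCast_mul, Int.toNat_natCast]

lemma alt_nil (R C : Int) (h : R ≤ 0 ∨ C ≤ 0) : zigzag_points_alt R C = [] := by
  unfold zigzag_points_alt
  rw [if_pos (by simp; omega)]

-- ===== VERDICT (by name: the statement is the Claim_ definition above) =====
theorem zigzag_points_spec : Claim_unchanged_zigzag_points := by
  intro rows cols hdom hnd
  unfold D_zigzag_points at hnd
  show zigzag_points rows cols = zigzag_points_alt rows cols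
  by_cases h1 : 1 ≤ rows ∧ 1 ≤ cols
  · obtain ⟨hr, hc⟩ := h1
    rw [alt_eq rows cols hr hc]
    unfold zigzag_points
    have hstart : zzStart rows cols 0 = (0, 0) := by
      unfold zzStart zzHi
      rw [if_pos (by decide)]
      simp only [Prod.mk.injEq]
      omega
    have := zz_outer rows cols hr hc ((rows + cols - 2).toNat) 0 (by omega) le_rfl
    rw [hstart, show decide ((0 : Int) % 2 = 0) = true from by decide,
        zzFuel_total rows cols hr hc] at this
    exact this
  · have hle : rows ≤ 0 ∨ cols ≤ 0 := by
      rcases not_and_or.mp h1 with h | h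
      · exact Or.inl (by omega)
      · exact Or.inr (by omega)
    have hprod : rows * cols ≤ 0 := by
      rcases hle with h | h
      · rcases lt_or_eq_of_le h with hlt | heq
        · have hc0 : 0 ≤ cols := by rcases not_and_or.mp hnd with h2 | h2 <;> omega
          exact mul_nonpos_iff.mpr (Or.inr ⟨le_of_lt hlt, hc0⟩)
        · rw [heq, zero_mul]
      · rcases lt_or_eq_of_le h with hlt | heq
        · have hr0 : 0 ≤ rows := by rcases not_and_or.mp hnd with h2 | h2 <;> omega
          exact mul_nonpos_iff.mpr (Or.inl ⟨hr0, le_of_lt hlt⟩)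
        · rw [heq, mul_zero]
    unfold zigzag_points
    rw [show (rows * cols).toNat = 0 from by omega, alt_nil rows cols hle]
    simp [zzA_loop]

theorem zigzag_points_changed : Claim_changed_zigzag_points := by
  unfold Claim_changed_zigzag_points
  refine ⟨by decide, by decide, ?_, by decide, by decide⟩
  show zigzag_points (-1) (-1) = [(0, 0)]
  norm_num [zigzag_points, zzA_loop]

theorem zigzag_points_tight : Claim_exact_zigzag_points := by
  intro rows cols hdom hD
  unfold D_zigzag_points at hD
  obtain ⟨hr, hc⟩ := hD
  have hpos : 0 < rows * cols := mul_pos_of_neg_of_neg hr hc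
  obtain ⟨n, hn⟩ : ∃ n, (rows * cols).toNat = n + 1 := ⟨(rows * cols).toNat - 1, by omega⟩
  rw [alt_nil rows cols (Or.inl (by omega))]
  unfold zigzag_points
  rw [hn]
  simp [zzA_loop]
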